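-- pv_equiv track=rewrite | github.com/Mouchnino/moneyguru | core/gui/lookup.py | has_letters
-- ===== SOURCE A (Python) =====
-- from collections import defaultdict
--
-- def has_letters(s, query):
--     s_letters = defaultdict(int)
--     query_letters = defaultdict(int)
--     for letter in query:
--         query_letters[letter] += 1
--     for letter in s:
--         s_letters[letter] += 1
--     for letter, count in query_letters.items():
--         if s_letters[letter] < count:
--             return False
--     return True
-- ===== SOURCE B (Python) =====
-- def has_letters(s, query):
--     pool = list(s)
--     for letter in query:
--         try:
--             pool.remove(letter)
--         except ValueError:
--             return False
--     return True
-- ===== Notes on version B (the rewrite author's own statement) =====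
-- stated objective: alternative
-- what changed: Drops counting entirely: B keeps a mutable pool of s's letters and crosses off (list.remove) each query letter one at a time, failing as soon as one cannot be removed, instead of building two frequency dicts and comparing counts.
import Mathlib
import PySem

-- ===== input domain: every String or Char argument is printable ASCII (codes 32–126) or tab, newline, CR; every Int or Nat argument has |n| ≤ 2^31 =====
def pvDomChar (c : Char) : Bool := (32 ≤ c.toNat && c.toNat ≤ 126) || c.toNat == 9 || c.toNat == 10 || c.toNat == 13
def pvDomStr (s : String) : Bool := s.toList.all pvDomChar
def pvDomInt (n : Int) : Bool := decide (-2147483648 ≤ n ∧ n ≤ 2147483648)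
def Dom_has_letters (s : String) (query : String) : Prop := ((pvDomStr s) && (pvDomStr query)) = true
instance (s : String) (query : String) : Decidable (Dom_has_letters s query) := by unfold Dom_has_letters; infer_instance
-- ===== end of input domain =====

-- B replaces A's two frequency dicts and comparison loop with destructive matching:
-- cross each query letter off a pool of s's letters, failing when one is missing (alternative, not faster).

-- ===== PORT A =====
-- A's items loop with early 'return False'; reading s_letters[letter] on a
-- defaultdict also inserts a 0 entry, which never affects the returned value,
-- so the read is ported as getD.
def pvACheck (sd : PySem.Dict Char Int) : List (Char × Int) → Bool
  | [] => true
  | (letter, count) :: rest =>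
      if sd.getD letter 0 < count then false else pvACheck sd rest

def has_letters (s : String) (query : String) : Bool :=
  let query_letters := query.toList.foldl (fun d c => d.modify c 0 (· + 1)) PySem.Dict.empty
  let s_letters := s.toList.foldl (fun d c => d.modify c 0 (· + 1)) PySem.Dict.empty
  pvACheck s_letters query_letters.items

-- ===== PORT B =====
-- the for-loop over query, carrying the pool; pool.remove(letter) is
-- PySem.List.remove? (none = ValueError, i.e. B's 'return False' branch)
def pvBLoop (pool : List Char) : List Char → Bool
  | [] => true
  | letter :: rest =>
      match PySem.List.remove? pool letter with
      | some pool' => pvBLoop pool' rest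
      | none => false

def has_letters_alt (s : String) (query : String) : Bool :=
  pvBLoop s.toList query.toList

-- ===== PRECONDITION & SPEC =====
def Spec_has_letters (s : String) (query : String) (out : Bool) : Prop := out = has_letters_alt s query
instance (s : String) (query : String) (out : Bool) : Decidable (Spec_has_letters s query out) := by unfold Spec_has_letters; infer_instance

-- ===== CLAIM =====
def Claim_equal_has_letters : Prop := ∀ (s : String) (query : String), Dom_has_letters s query → Spec_has_letters s query (has_letters s query)

-- ===== LEMMAS AND PROOFS =====
-- Both sides decide sub-multiset inclusion: counts of query ≤ counts of s.

lemma pvACheck_iff (sd : PySem.Dict Char Int) (l : List (Char × Int)) :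
    pvACheck sd l = true ↔ ∀ p ∈ l, ¬ (sd.getD p.1 0 < p.2) := by
  induction l with
  | nil => simp [pvACheck]
  | cons p rest ih =>
    obtain ⟨k, c⟩ := p
    by_cases h : sd.getD k 0 < c
    · simp [pvACheck, h]
    · simp [pvACheck, h, ih]
      intro _
      omega

lemma hasA_iff (s query : String) :
    has_letters s query = true ↔
      ∀ c, query.toList.count c ≤ s.toList.count c := by
  unfold has_letters
  rw [← PySem.Dict.counter_eq_foldl, ← PySem.Dict.counter_eq_foldl]
  rw [pvACheck_iff]
  simp only [PySem.Dict.items_counter, List.mem_map, PySem.Set.mem_ofList]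
  constructor
  · intro h c
    by_cases hc : c ∈ query.toList
    · have := h (c, (query.toList.count c : Int)) ⟨c, hc, rfl⟩
      rw [PySem.Dict.getD_counter] at this
      dsimp only at this
      omega
    · simp [List.count_eq_zero_of_not_mem hc]
  · rintro h p ⟨k, hk, rfl⟩
    rw [PySem.Dict.getD_counter]
    dsimp only
    have := h k
    omega

lemma pvBLoop_iff (qs : List Char) : ∀ (pool : List Char),
    pvBLoop pool qs = true ↔ ∀ c, qs.count c ≤ pool.count c := by
  induction qs with
  | nil => intro pool; simp [pvBLoop]
  | cons a rest ih =>
    intro pool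
    by_cases hmem : a ∈ pool
    · have hpos : 1 ≤ pool.count a := List.count_pos_iff.mpr hmem
      simp only [pvBLoop, PySem.List.remove?_eq_some_erase _ _ hmem, ih]
      constructor
      · intro h c
        have := h c
        rw [List.count_erase] at this
        rw [List.count_cons]
        by_cases hca : c = a
        · subst hca; simp at this ⊢; omega
        · simp [Ne.symm hca, beq_iff_eq] at this ⊢; omega
      · intro h c
        have := h c
        rw [List.count_erase]
        rw [List.count_cons] at this
        by_cases hca : c = a
        · subst hca; simp at this ⊢; omega
        · simp [Ne.symm hca, beq_iff_eq] at this ⊢; omega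
    · have : PySem.List.remove? pool a = none := (PySem.List.remove?_eq_none_iff pool a).mpr hmem
      simp only [pvBLoop, this]
      constructor
      · intro h; cases h
      · intro h
        have := h a
        rw [List.count_eq_zero_of_not_mem hmem] at this
        simp [List.count_cons_self] at this

-- ===== VERDICT =====
theorem has_letters_spec : Claim_equal_has_letters := by
  intro s query _
  unfold Spec_has_letters has_letters_alt
  rw [Bool.eq_iff_iff, hasA_iff, pvBLoop_iff]
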